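-- pv_equiv track=rewrite | github.com/MichiganNLP/empathy_eval | scripts/ngrams.py | span_frequency
-- ===== SOURCE A (Python) =====
-- from collections import defaultdict, Counter
--
-- def _span_frequency_count(tokens, hashmap, span_freq):
--     """
--     Recursive helper function.
--     """
--     for token in tokens:
--         span_freq[token] += 1
--         if token not in hashmap:
--             continue
--         span_ref = hashmap[token]
--         _span_frequency_count(span_ref, hashmap, span_freq)
--
-- def span_frequency(data, hashmap):
--     """
--     Recursively count number of occurances of each template span.
--     """
--     span_freq = defaultdict(int)
--     for sentence in data:
--         _span_frequency_count(sentence, hashmap, span_freq)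
--     span_freq = Counter(
--         {
--             _hash: _count
--             for _hash, _count in span_freq.items()
--             if _hash.startswith("span_")
--         }
--     )
--     return span_freq
-- ===== SOURCE B (Python) =====
-- from collections import Counter
--
-- def span_frequency(data, hashmap):
--     """
--     Iterative depth-first expansion with an explicit stack (no recursion),
--     counting only 'span_'-prefixed tokens as they are visited.
--     """
--     freq = {}
--     for sentence in data:
--         stack = list(reversed(sentence))
--         while stack:
--             token = stack.pop()
--             if token.startswith("span_"):
--                 freq[token] = freq.get(token, 0) + 1
--             ref = hashmap.get(token)
--             if ref is not None:
--                 stack.extend(reversed(ref))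
--     return Counter(freq)
-- ===== Notes on version B (the rewrite author's own statement) =====
-- stated objective: alternative
-- what changed: A's recursive helper that re-expands span references via Python recursion and counts every token before filtering is replaced by an iterative explicit-stack depth-first expansion that counts only 'span_'-prefixed tokens during the walk, so no recursion depth is consumed and no counts for non-span tokens are ever stored.
import Mathlib
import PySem

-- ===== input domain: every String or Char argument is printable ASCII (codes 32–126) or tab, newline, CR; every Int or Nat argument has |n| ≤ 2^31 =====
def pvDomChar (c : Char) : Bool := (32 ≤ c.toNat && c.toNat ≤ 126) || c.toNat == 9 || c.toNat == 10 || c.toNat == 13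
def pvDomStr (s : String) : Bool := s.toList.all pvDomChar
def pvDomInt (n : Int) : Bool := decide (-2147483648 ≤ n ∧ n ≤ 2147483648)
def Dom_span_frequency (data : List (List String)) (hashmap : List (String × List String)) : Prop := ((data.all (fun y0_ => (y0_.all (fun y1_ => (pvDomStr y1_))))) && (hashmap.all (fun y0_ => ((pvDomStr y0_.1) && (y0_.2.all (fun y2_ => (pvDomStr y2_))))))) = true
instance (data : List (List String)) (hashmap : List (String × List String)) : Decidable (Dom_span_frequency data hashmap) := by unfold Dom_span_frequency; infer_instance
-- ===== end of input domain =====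

-- B replaces A's recursive expansion by an explicit-stack iterative traversal that
-- counts only the 'span_'-prefixed tokens during the walk (no post-hoc filtering);
-- objective: alternative decomposition of the same exact computation.

-- ===== PORT A =====
-- A's recursive helper `_span_frequency_count`; the Nat argument is fuel scaffolding
-- for totality only (one unit per recursion level; Pre_ guarantees it is never exhausted).
def pvCountA (hm : PySem.Dict String (List String)) : Nat → List String → PySem.Dict String Int → PySem.Dict String Int
  | _, [], d => d
  | fuel, t :: ts, d =>
    let d1 := PySem.Dict.modify d t 0 (· + 1)        -- span_freq[token] += 1
    let d2 := match PySem.Dict.get? hm t, fuel with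
      | none, _ => d1                                 -- token not in hashmap: continue
      | some _, 0 => d1                               -- fuel exhausted (unreachable under Pre_)
      | some ref, f + 1 => pvCountA hm f ref d1       -- recurse into the referenced span
    pvCountA hm fuel ts d2
termination_by fuel ts => (fuel, ts.length)

def span_frequency (data : List (List String)) (hashmap : List (String × List String)) : List (String × Int) :=
  let hm := PySem.Dict.ofList hashmap
  let d := data.foldl (fun d s => pvCountA hm (hm.size + 1) s d) PySem.Dict.empty
  (PySem.Dict.items d).filter (fun q => PySem.Str.startswith q.1 "span_")

-- ===== PORT B =====
-- full preorder expansion of one token to depth n (used only to size B's fuel and in proofs)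
def pvExpand (hm : PySem.Dict String (List String)) : Nat → String → List String
  | 0, t => [t]
  | n + 1, t =>
    t :: (match PySem.Dict.get? hm t with
          | none => []
          | some ref => ref.flatMap (pvExpand hm n))

-- fuel for B's while-loop: one unit per pop = the total expanded length of the sentence
def pvFuelB (hm : PySem.Dict String (List String)) (s : List String) : Nat :=
  (s.map (fun t => (pvExpand hm hm.size t).length)).sum

-- B's while-loop.  The Lean list holds Python's stack reversed: head = next pop;
-- `stack.extend(reversed(ref))` therefore becomes `ref ++ stack`.
def pvCountB (hm : PySem.Dict String (List String)) : Nat → List String → PySem.Dict String Int → PySem.Dict String Int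
  | 0, _, d => d                                      -- fuel exhausted (unreachable under Pre_)
  | _, [], d => d                                     -- while stack: loop ends
  | f + 1, t :: stack, d =>
    let d1 := if PySem.Str.startswith t "span_"
              then PySem.Dict.insert d t (PySem.Dict.getD d t 0 + 1)   -- freq[token] = freq.get(token,0)+1
              else d
    match PySem.Dict.get? hm t with
    | none => pvCountB hm f stack d1
    | some ref => pvCountB hm f (ref ++ stack) d1

def span_frequency_alt (data : List (List String)) (hashmap : List (String × List String)) : List (String × Int) :=
  let hm := PySem.Dict.ofList hashmap
  let d := data.foldl (fun d s => pvCountB hm (pvFuelB hm s) s d) PySem.Dict.empty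
  PySem.Dict.items d

-- ===== PRECONDITION & SPEC =====
-- `pvExpandOK hm n t`: in the reference graph of hm, every reference chain from t
-- bottoms out within n levels — a property of the input's graph only (no counting,
-- no dict state); with n = number of keys it says exactly 'no cycle is reachable
-- from t', stated with an explicit depth bound so that it is decidable.
def pvExpandOK (hm : PySem.Dict String (List String)) : Nat → String → Bool
  | 0, t => !(PySem.Dict.contains hm t)
  | n + 1, t =>
    match PySem.Dict.get? hm t with
    | none => true
    | some ref => ref.all (pvExpandOK hm n)

-- Pre_ excludes exactly the inputs whose reference graph, followed from a token of data,
-- is cyclic: there A's unbounded recursion raises RecursionError (B loops forever too).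
def Pre_span_frequency (data : List (List String)) (hashmap : List (String × List String)) : Prop :=
  ∀ s ∈ data, ∀ t ∈ s, pvExpandOK (PySem.Dict.ofList hashmap) (PySem.Dict.ofList hashmap).size t = true
instance (data : List (List String)) (hashmap : List (String × List String)) : Decidable (Pre_span_frequency data hashmap) := by unfold Pre_span_frequency; infer_instance

def pvWitness_span_frequency : List (List String) × (List (String × List String)) :=
  ([["a", "span_x"], ["span_x", "b"]], [("span_x", ["span_y", "b"]), ("span_y", [])])

def Spec_span_frequency (data : List (List String)) (hashmap : List (String × List String)) (out : List (String × Int)) : Prop := out = span_frequency_alt data hashmap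
instance (data : List (List String)) (hashmap : List (String × List String)) (out : List (String × Int)) : Decidable (Spec_span_frequency data hashmap out) := by unfold Spec_span_frequency; infer_instance

-- ===== CLAIM (what is proved, stated in full; the proofs are below) =====
def Claim_equal_span_frequency : Prop := ∀ (data : List (List String)) (hashmap : List (String × List String)), Dom_span_frequency data hashmap → Pre_span_frequency data hashmap → Spec_span_frequency data hashmap (span_frequency data hashmap)

-- ===== LEMMAS AND PROOFS =====

def pvBump (d : PySem.Dict String Int) (t : String) : PySem.Dict String Int :=
  PySem.Dict.insert d t (PySem.Dict.getD d t 0 + 1)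

def pvBumpSpan (d : PySem.Dict String Int) (t : String) : PySem.Dict String Int :=
  if PySem.Str.startswith t "span_" then pvBump d t else d

lemma pv_flatMap_congr_mem {α β : Type} {l : List α} {f g : α → List β}
    (h : ∀ x ∈ l, f x = g x) : l.flatMap f = l.flatMap g := by
  induction l with
  | nil => rfl
  | cons x l ih =>
    simp only [List.flatMap_cons, h x (by simp), ih (fun y hy => h y (by simp [hy]))]

lemma pv_ok_mono (hm : PySem.Dict String (List String)) :
    ∀ n t, pvExpandOK hm n t = true → pvExpandOK hm (n + 1) t = true := by
  intro n
  induction n with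
  | zero =>
    intro t h
    simp only [pvExpandOK, Bool.not_eq_true'] at h
    rw [PySem.Dict.contains_eq_isSome_get?] at h
    simp only [pvExpandOK]
    cases hg : PySem.Dict.get? hm t with
    | none => rfl
    | some ref => rw [hg] at h; simp at h
  | succ n ih =>
    intro t h
    simp only [pvExpandOK] at h ⊢
    cases hg : PySem.Dict.get? hm t with
    | none => rfl
    | some ref =>
      rw [hg] at h
      simp only [List.all_eq_true] at h ⊢
      exact fun c hc => ih c (h c hc)

lemma pv_expand_stable (hm : PySem.Dict String (List String)) :
    ∀ n t, pvExpandOK hm n t = true → ∀ m, n ≤ m → pvExpand hm m t = pvExpand hm n t := by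
  intro n
  induction n with
  | zero =>
    intro t h m _
    simp only [pvExpandOK, Bool.not_eq_true'] at h
    rw [PySem.Dict.contains_eq_isSome_get?] at h
    cases m with
    | zero => rfl
    | succ m =>
      cases hg : PySem.Dict.get? hm t with
      | none => simp [pvExpand, hg]
      | some ref => rw [hg] at h; simp at h
  | succ n ih =>
    intro t h m hm'
    obtain ⟨m, rfl⟩ : ∃ m', m = m' + 1 := ⟨m - 1, by omega⟩
    simp only [pvExpandOK] at h
    cases hg : PySem.Dict.get? hm t with
    | none => simp [pvExpand, hg]
    | some ref =>
      rw [hg] at h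
      simp only [List.all_eq_true] at h
      simp only [pvExpand, hg, List.cons.injEq, true_and]
      exact pv_flatMap_congr_mem (fun c hc => ih c (h c hc) m (by omega))

lemma pv_expand_length_pos (hm : PySem.Dict String (List String)) (n : Nat) (t : String) :
    0 < (pvExpand hm n t).length := by
  cases n <;> simp [pvExpand]

lemma pv_expand_of_none (hm : PySem.Dict String (List String)) (n : Nat) (t : String)
    (hg : PySem.Dict.get? hm t = none) : pvExpand hm n t = [t] := by
  cases n <;> simp [pvExpand, hg]

lemma pv_countA_eq (hm : PySem.Dict String (List String)) :
    ∀ n ts fuel (d : PySem.Dict String Int), (∀ t ∈ ts, pvExpandOK hm n t = true) → n < fuel →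
      pvCountA hm fuel ts d = (ts.flatMap (pvExpand hm n)).foldl pvBump d := by
  intro n
  induction n using Nat.strong_induction_on with
  | _ n IHn =>
    intro ts
    induction ts with
    | nil => intro fuel d _ _; cases fuel <;> simp [pvCountA]
    | cons t ts IHts =>
      intro fuel d hOK hlt
      obtain ⟨f, rfl⟩ : ∃ f, fuel = f + 1 := ⟨fuel - 1, by omega⟩
      have hOKt := hOK t (by simp)
      cases hg : PySem.Dict.get? hm t with
      | none =>
        rw [pvCountA.eq_def]
        simp only [hg]
        rw [List.flatMap_cons, pv_expand_of_none hm n t hg, List.foldl_append]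
        exact IHts (f + 1) _ (fun c hc => hOK c (by simp [hc])) hlt
      | some ref =>
        rw [pvCountA.eq_def]
        simp only [hg]
        obtain ⟨m, rfl⟩ : ∃ m, n = m + 1 := by
          cases n with
          | zero =>
            exfalso
            simp only [pvExpandOK, Bool.not_eq_true'] at hOKt
            rw [PySem.Dict.contains_eq_isSome_get?, hg] at hOKt
            simp at hOKt
          | succ m => exact ⟨m, rfl⟩
        have hchild : ∀ c ∈ ref, pvExpandOK hm m c = true := by
          simp only [pvExpandOK, hg, List.all_eq_true] at hOKt
          exact hOKt
        rw [IHn m (by omega) ref f _ hchild (by omega)]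
        simp only [pvExpand, hg, List.flatMap_cons, List.cons_append, List.foldl_cons,
          List.foldl_append]
        have hmod : PySem.Dict.modify d t 0 (· + 1) = pvBump d t := rfl
        rw [hmod]
        exact IHts (f + 1) _ (fun c hc => hOK c (by simp [hc])) (by omega)

lemma pv_countB_eq (hm : PySem.Dict String (List String)) (N : Nat) :
    ∀ fuel stack (d : PySem.Dict String Int), (∀ t ∈ stack, pvExpandOK hm N t = true) →
      (stack.flatMap (pvExpand hm N)).length ≤ fuel →
      pvCountB hm fuel stack d = (stack.flatMap (pvExpand hm N)).foldl pvBumpSpan d := by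
  intro fuel
  induction fuel with
  | zero =>
    intro stack d _ hlen
    cases stack with
    | nil => simp [pvCountB]
    | cons t rest =>
      exfalso
      have := pv_expand_length_pos hm N t
      simp only [List.flatMap_cons, List.length_append, Nat.le_zero] at hlen
      omega
  | succ f ih =>
    intro stack d hOK hlen
    cases stack with
    | nil => simp [pvCountB]
    | cons t rest =>
      have hOKt := hOK t (by simp)
      simp only [pvCountB]
      have hbump : (if PySem.Str.startswith t "span_"
          then PySem.Dict.insert d t (PySem.Dict.getD d t 0 + 1) else d) = pvBumpSpan d t := rfl
      rw [hbump]
      cases hg : PySem.Dict.get? hm t with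
      | none =>
        rw [List.flatMap_cons, pv_expand_of_none hm N t hg]
        simp only [List.singleton_append, List.foldl_cons]
        apply ih rest _ (fun c hc => hOK c (by simp [hc]))
        rw [List.flatMap_cons, pv_expand_of_none hm N t hg] at hlen
        simp only [List.singleton_append, List.length_cons] at hlen
        omega
      | some ref =>
        obtain ⟨M, rfl⟩ : ∃ M, N = M + 1 := by
          cases N with
          | zero =>
            exfalso
            simp only [pvExpandOK, Bool.not_eq_true'] at hOKt
            rw [PySem.Dict.contains_eq_isSome_get?, hg] at hOKt
            simp at hOKt
          | succ M => exact ⟨M, rfl⟩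
        have hchild : ∀ c ∈ ref, pvExpandOK hm M c = true := by
          simp only [pvExpandOK, hg, List.all_eq_true] at hOKt
          exact hOKt
        have hstab : ∀ c ∈ ref, pvExpand hm (M + 1) c = pvExpand hm M c :=
          fun c hc => pv_expand_stable hm M c (hchild c hc) (M + 1) (by omega)
        have hexp : pvExpand hm (M + 1) t = t :: ref.flatMap (pvExpand hm (M + 1)) := by
          simp only [pvExpand, hg, List.cons.injEq, true_and]
          exact (pv_flatMap_congr_mem hstab).symm
        have hdecomp : (t :: rest).flatMap (pvExpand hm (M + 1))
            = t :: (ref ++ rest).flatMap (pvExpand hm (M + 1)) := by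
          rw [List.flatMap_cons, hexp, List.flatMap_append]
          rfl
        rw [hdecomp, List.foldl_cons]
        apply ih
        · intro c hc
          rcases List.mem_append.mp hc with hc | hc
          · exact pv_ok_mono hm M c (hchild c hc)
          · exact hOK c (by simp [hc])
        · rw [hdecomp] at hlen
          simp only [List.length_cons] at hlen
          omega

-- the invariant between the two running dicts: B's items are A's items filtered to span_ keys

lemma pv_find?_filter {p : String → Bool} (l : List (String × Int)) (t : String)
    (hp : p t = true) :
    (l.filter (fun q => p q.1)).find? (fun q => q.1 == t) = l.find? (fun q => q.1 == t) := by
  induction l with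
  | nil => rfl
  | cons q l ih =>
    obtain ⟨k, w⟩ := q
    by_cases hq : k = t
    · subst hq
      simp [hp]
    · by_cases hpq : p k = true
      · simp [hq, hpq, ih]
      · simp only [Bool.not_eq_true] at hpq
        simp [hq, hpq, ih]

lemma pv_get?_filter (dA dB : PySem.Dict String Int) (t : String)
    (h : PySem.Dict.items dB = (PySem.Dict.items dA).filter (fun q => PySem.Str.startswith q.1 "span_"))
    (hp : PySem.Str.startswith t "span_" = true) :
    PySem.Dict.get? dB t = PySem.Dict.get? dA t := by
  simp only [PySem.Dict.get?]
  rw [show dB.items = PySem.Dict.items dB from rfl, h,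
    pv_find?_filter (p := fun s => PySem.Str.startswith s "span_") _ t hp]

lemma pv_contains_filter (dA dB : PySem.Dict String Int) (t : String)
    (h : PySem.Dict.items dB = (PySem.Dict.items dA).filter (fun q => PySem.Str.startswith q.1 "span_"))
    (hp : PySem.Str.startswith t "span_" = true) :
    PySem.Dict.contains dB t = PySem.Dict.contains dA t := by
  rw [PySem.Dict.contains_eq_isSome_get?, PySem.Dict.contains_eq_isSome_get?,
    pv_get?_filter dA dB t h hp]

lemma pv_filter_map_upd_of_p {p : String → Bool} (t : String) (v : Int)
    (hp : p t = true) (l : List (String × Int)) :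
    (l.map (fun q => if q.1 == t then (t, v) else q)).filter (fun q => p q.1)
      = (l.filter (fun q => p q.1)).map (fun q => if q.1 == t then (t, v) else q) := by
  simp only [beq_iff_eq]
  induction l with
  | nil => rfl
  | cons q l ih =>
    obtain ⟨k, w⟩ := q
    by_cases hq : k = t
    · subst hq
      simp [hp, ih]
    · by_cases hpq : p k = true
      · simp [hq, hpq, ih]
      · simp only [Bool.not_eq_true] at hpq
        simp [hq, hpq, ih]

lemma pv_filter_map_upd_of_not_p {p : String → Bool} (t : String) (v : Int)
    (hp : p t = false) (l : List (String × Int)) :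
    (l.map (fun q => if q.1 == t then (t, v) else q)).filter (fun q => p q.1)
      = l.filter (fun q => p q.1) := by
  simp only [beq_iff_eq]
  induction l with
  | nil => rfl
  | cons q l ih =>
    obtain ⟨k, w⟩ := q
    by_cases hq : k = t
    · subst hq
      simp [hp, ih]
    · by_cases hpq : p k = true
      · simp [hq, hpq, ih]
      · simp only [Bool.not_eq_true] at hpq
        simp [hq, hpq, ih]

lemma pv_filter_append_singleton_of_p {p : String → Bool} (l : List (String × Int))
    (x : String × Int) (hp : p x.1 = true) :
    (l ++ [x]).filter (fun q => p q.1) = l.filter (fun q => p q.1) ++ [x] := by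
  rw [List.filter_append]
  simp [hp]

lemma pv_filter_append_singleton_of_not_p {p : String → Bool} (l : List (String × Int))
    (x : String × Int) (hp : p x.1 = false) :
    (l ++ [x]).filter (fun q => p q.1) = l.filter (fun q => p q.1) := by
  rw [List.filter_append]
  simp [hp]

lemma pv_step (dA dB : PySem.Dict String Int) (t : String)
    (h : PySem.Dict.items dB = (PySem.Dict.items dA).filter (fun q => PySem.Str.startswith q.1 "span_")) :
    PySem.Dict.items (pvBumpSpan dB t)
      = (PySem.Dict.items (pvBump dA t)).filter (fun q => PySem.Str.startswith q.1 "span_") := by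
  by_cases hp : PySem.Str.startswith t "span_" = true
  · have hget := pv_get?_filter dA dB t h hp
    have hcont := pv_contains_filter dA dB t h hp
    have hgetD : PySem.Dict.getD dB t 0 = PySem.Dict.getD dA t 0 := by
      simp only [PySem.Dict.getD, hget]
    simp only [pvBumpSpan, hp, if_true, pvBump, PySem.Dict.insert, hgetD, hcont]
    by_cases hc : PySem.Dict.contains dA t = true
    · simp only [hc, if_true]
      rw [pv_filter_map_upd_of_p (p := fun s => PySem.Str.startswith s "span_") t _ hp, h]
    · simp only [Bool.not_eq_true] at hc
      simp only [hc, Bool.false_eq_true, if_false]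
      show dB.items ++ [(t, PySem.Dict.getD dA t 0 + 1)]
          = (dA.items ++ [(t, PySem.Dict.getD dA t 0 + 1)]).filter (fun q => PySem.Str.startswith q.1 "span_")
      rw [pv_filter_append_singleton_of_p (p := fun s => PySem.Str.startswith s "span_") _ _ hp, h]
  · simp only [Bool.not_eq_true] at hp
    simp only [pvBumpSpan, hp, Bool.false_eq_true, if_false, pvBump, PySem.Dict.insert]
    by_cases hc : PySem.Dict.contains dA t = true
    · simp only [hc, if_true]
      rw [pv_filter_map_upd_of_not_p (p := fun s => PySem.Str.startswith s "span_") t _ hp, h]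
    · simp only [Bool.not_eq_true] at hc
      simp only [hc, Bool.false_eq_true, if_false]
      show dB.items = (dA.items ++ [(t, PySem.Dict.getD dA t 0 + 1)]).filter (fun q => PySem.Str.startswith q.1 "span_")
      rw [pv_filter_append_singleton_of_not_p (p := fun s => PySem.Str.startswith s "span_") _ _ hp, h]

lemma pv_fold_step (L : List String) :
    ∀ (dA dB : PySem.Dict String Int),
      PySem.Dict.items dB = (PySem.Dict.items dA).filter (fun q => PySem.Str.startswith q.1 "span_") →
      PySem.Dict.items (L.foldl pvBumpSpan dB)
        = (PySem.Dict.items (L.foldl pvBump dA)).filter (fun q => PySem.Str.startswith q.1 "span_") := by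
  induction L with
  | nil => intro dA dB h; exact h
  | cons t L ih =>
    intro dA dB h
    simp only [List.foldl_cons]
    exact ih _ _ (pv_step dA dB t h)

-- collapse the per-sentence folds of each port into one fold over the full expansion

lemma pv_dataA (hm : PySem.Dict String (List String)) :
    ∀ (data : List (List String)) (d : PySem.Dict String Int),
      (∀ s ∈ data, ∀ t ∈ s, pvExpandOK hm hm.size t = true) →
      data.foldl (fun d s => pvCountA hm (hm.size + 1) s d) d
        = (data.flatMap (fun s => s.flatMap (pvExpand hm hm.size))).foldl pvBump d := by
  intro data
  induction data with
  | nil => intro d _; rfl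
  | cons s data ih =>
    intro d hOK
    simp only [List.foldl_cons, List.flatMap_cons, List.foldl_append]
    rw [pv_countA_eq hm hm.size s (hm.size + 1) d (hOK s (by simp)) (by omega)]
    exact ih _ (fun s' hs' => hOK s' (by simp [hs']))

lemma pv_dataB (hm : PySem.Dict String (List String)) :
    ∀ (data : List (List String)) (d : PySem.Dict String Int),
      (∀ s ∈ data, ∀ t ∈ s, pvExpandOK hm hm.size t = true) →
      data.foldl (fun d s => pvCountB hm (pvFuelB hm s) s d) d
        = (data.flatMap (fun s => s.flatMap (pvExpand hm hm.size))).foldl pvBumpSpan d := by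
  intro data
  induction data with
  | nil => intro d _; rfl
  | cons s data ih =>
    intro d hOK
    simp only [List.foldl_cons, List.flatMap_cons, List.foldl_append]
    rw [pv_countB_eq hm hm.size (pvFuelB hm s) s d (hOK s (by simp))
      (by rw [List.length_flatMap]; exact Nat.le_of_eq rfl)]
    exact ih _ (fun s' hs' => hOK s' (by simp [hs']))

-- ===== VERDICT (by name: the statement is the Claim_ definition above) =====
theorem span_frequency_spec : Claim_equal_span_frequency := by
  unfold Claim_equal_span_frequency
  intro data hashmap _ hPre
  unfold Spec_span_frequency span_frequency span_frequency_alt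
  dsimp only
  rw [pv_dataA (PySem.Dict.ofList hashmap) data PySem.Dict.empty hPre,
    pv_dataB (PySem.Dict.ofList hashmap) data PySem.Dict.empty hPre]
  exact (pv_fold_step _ PySem.Dict.empty PySem.Dict.empty rfl).symm
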